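-- pv_equiv track=rewrite | github.com/tomasaschan/advent-of-code-2020 | src/aoc/2020/dec24.py | normalize
-- ===== SOURCE A (Python) =====
-- from collections import defaultdict
--
-- def normalize(path):
--     steps = defaultdict(int)
--
--     for step in path:
--         steps[step] += 1
--
--     unidirectional = (
--         steps["w"] - steps["e"],
--         steps["nw"] - steps["se"],
--         steps["ne"] - steps["sw"],
--     )
--
--     normalized = (
--         unidirectional[0] - unidirectional[2],
--         unidirectional[1] + unidirectional[2],
--     )
--
--     return normalized
-- ===== SOURCE B (Python) =====
-- _DELTAS = {
--     "w": (1, 0), "e": (-1, 0),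
--     "nw": (0, 1), "se": (0, -1),
--     "ne": (-1, 1), "sw": (1, -1),
-- }
--
-- def normalize(path):
--     x, y = 0, 0
--     for step in path:
--         dx, dy = _DELTAS.get(step, (0, 0))
--         x += dx
--         y += dy
--     return (x, y)
-- ===== Notes on version B (the rewrite author's own statement) =====
-- stated objective: simpler
-- what changed: Replaces the counting dict plus two-stage closed-form arithmetic with a single pass that accumulates a running (x, y) coordinate by adding a per-direction delta.
import Mathlib
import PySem

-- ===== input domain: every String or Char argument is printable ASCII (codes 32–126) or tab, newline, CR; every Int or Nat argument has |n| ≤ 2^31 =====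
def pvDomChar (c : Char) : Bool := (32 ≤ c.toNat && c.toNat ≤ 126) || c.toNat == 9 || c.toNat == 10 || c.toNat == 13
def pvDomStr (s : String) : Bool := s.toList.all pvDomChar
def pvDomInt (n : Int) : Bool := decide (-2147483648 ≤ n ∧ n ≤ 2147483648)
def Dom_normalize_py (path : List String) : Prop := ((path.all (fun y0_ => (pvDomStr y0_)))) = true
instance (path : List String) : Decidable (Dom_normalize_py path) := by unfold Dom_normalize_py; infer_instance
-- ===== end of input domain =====

-- B replaces A's counting dict + closed-form arithmetic with a single-pass running (x, y) accumulation of per-direction deltas (simpler).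


-- ===== PORT A =====
def normalize_py (path : List String) : Int × Int :=
  let steps : PySem.Dict String Int :=
    path.foldl (fun d step => d.modify step 0 (· + 1)) PySem.Dict.empty
  let unidirectional : Int × Int × Int :=
    (steps.getD "w" 0 - steps.getD "e" 0,
     steps.getD "nw" 0 - steps.getD "se" 0,
     steps.getD "ne" 0 - steps.getD "sw" 0)
  (unidirectional.1 - unidirectional.2.2,
   unidirectional.2.1 + unidirectional.2.2)

-- ===== PORT B =====
def pvDelta (s : String) : Int × Int :=
  if s = "w" then (1, 0)
  else if s = "e" then (-1, 0)
  else if s = "nw" then (0, 1)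
  else if s = "se" then (0, -1)
  else if s = "ne" then (-1, 1)
  else if s = "sw" then (1, -1)
  else (0, 0)

def normalize_py_alt (path : List String) : Int × Int :=
  path.foldl (fun p step => (p.1 + (pvDelta step).1, p.2 + (pvDelta step).2)) (0, 0)

-- ===== PRECONDITION & SPEC =====
def Spec_normalize_py (path : List String) (out : Int × Int) : Prop := out = normalize_py_alt path
instance (path : List String) (out : Int × Int) : Decidable (Spec_normalize_py path out) := by unfold Spec_normalize_py; infer_instance

-- ===== CLAIM (what is proved, stated in full; the proofs are below) =====
def Claim_equal_normalize_py : Prop := ∀ (path : List String), Dom_normalize_py path → Spec_normalize_py path (normalize_py path)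

-- ===== LEMMAS AND PROOFS =====

-- B's fold equals the closed form over counts, for any starting accumulator.
theorem alt_foldl_eq (path : List String) (x y : Int) :
    path.foldl (fun p step => (p.1 + (pvDelta step).1, p.2 + (pvDelta step).2)) (x, y) =
      (x + ((path.count "w" : Int) - path.count "e" - path.count "ne" + path.count "sw"),
       y + ((path.count "nw" : Int) - path.count "se" + path.count "ne" - path.count "sw")) := by
  induction path generalizing x y with
  | nil => simp
  | cons s l ih =>
    simp only [List.foldl_cons, List.count_cons, beq_iff_eq]
    rw [ih]; clear ih
    unfold pvDelta
    by_cases h1 : s = "w"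
    · subst h1; simp [Prod.mk.injEq]; omega
    by_cases h2 : s = "e"
    · subst h2; simp [Prod.mk.injEq]; omega
    by_cases h3 : s = "nw"
    · subst h3; simp [Prod.mk.injEq]; omega
    by_cases h4 : s = "se"
    · subst h4; simp [Prod.mk.injEq]; omega
    by_cases h5 : s = "ne"
    · subst h5; simp [Prod.mk.injEq]; omega
    by_cases h6 : s = "sw"
    · subst h6; simp [Prod.mk.injEq]; omega
    · simp [h1, h2, h3, h4, h5, h6]

theorem normalize_py_eq (path : List String) : normalize_py path = normalize_py_alt path := by
  simp only [normalize_py, normalize_py_alt, PySem.Dict.getD_foldl_modify_add_one,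
    PySem.Dict.getD_empty, alt_foldl_eq]
  simp only [Prod.mk.injEq]
  constructor <;> ring

-- ===== VERDICT (by name: the statement is the Claim_ definition above) =====
theorem normalize_py_spec : Claim_equal_normalize_py := by
  intro path _
  exact normalize_py_eq path
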